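-- pv_equiv track=rewrite | github.com/MohamedAghzal/llms-as-path-planners | Can Large Language Models be Good Path Planners/inference/t5_out.py | solution_direction
-- ===== SOURCE A (Python) =====
-- def solution_direction(path):
--
--     if(path == 'Goal not reachable'):
--         return path
--
--     path = path.split(' ')
--
--     directions = ''
--
--     orientation = 'south'
--
--     for i in range(len(path)):
--
--         if(path[i] == 'right'):
--             if(orientation == 'south'):
--                 directions += 'turn left move forward '
--                 orientation = 'east'
--             elif (orientation == 'north'):
--                 directions += 'turn right move forward '
--                 orientation = 'east'
--             elif (orientation == 'east'):
--                 directions += 'move forward '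
--             elif (orientation == 'west'):
--                 directions += 'turn right turn right move forward '
--                 orientation = 'east'
--         elif (path[i] == 'left'):
--             if(orientation == 'south'):
--                 directions += 'turn right move forward '
--                 orientation = 'west'
--             elif (orientation == 'north'):
--                 directions += 'turn left move forward '
--                 orientation = 'west'
--             elif (orientation == 'east'):
--                 directions += 'turn left turn left move forward '
--                 orientation = 'west'
--             elif (orientation == 'west'):
--                 directions += 'move forward '
--         elif (path[i] == 'down'):
--             if(orientation == 'south'):
--                 directions += 'move forward '
--                 orientation = 'south'
--             elif (orientation == 'north'):
--                 directions += 'turn left turn left move forward '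
--                 orientation = 'south'
--             elif (orientation == 'east'):
--                 directions += 'turn right move forward '
--                 orientation = 'south'
--             elif (orientation == 'west'):
--                 directions += 'turn left move forward '
--                 orientation = 'south'
--         elif (path[i] == 'up'):
--             if(orientation == 'south'):
--                 directions += 'turn right turn right move forward '
--                 orientation = 'north'
--             elif (orientation == 'north'):
--                 directions += 'move forward '
--                 orientation = 'north'
--             elif (orientation == 'east'):
--                 directions += 'turn left move forward '
--                 orientation = 'north'
--             elif (orientation == 'west'):
--                 directions += 'turn right move forward '
--                 orientation = 'north'
--
--     return directions
-- ===== SOURCE B (Python) =====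
-- _TARGET = {'down': 0, 'right': 1, 'up': 2, 'left': 3}  # index on cycle south,east,north,west (left = +1 mod 4)
--
-- def solution_direction(path):
--     if path == 'Goal not reachable':
--         return path
--     out = []
--     cur = 0  # facing south
--     for tok in path.split(' '):
--         t = _TARGET.get(tok)
--         if t is None:
--             continue
--         d = (t - cur) % 4
--         if d == 1:
--             out.append('turn left ')
--         elif d == 3:
--             out.append('turn right ')
--         elif d == 2:
--             out.append('turn right turn right ' if t in (1, 2) else 'turn left turn left ')
--         out.append('move forward ')
--         cur = t
--     return ''.join(out)
-- ===== Notes on version B (the rewrite author's own statement) =====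
-- stated objective: simpler
-- what changed: Replaces A's exhaustive 16-branch (orientation, token) table with modular arithmetic: each token maps to a target index on the orientation cycle south,east,north,west and the turn prefix is read off d=(target-current) mod 4.
import Mathlib
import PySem

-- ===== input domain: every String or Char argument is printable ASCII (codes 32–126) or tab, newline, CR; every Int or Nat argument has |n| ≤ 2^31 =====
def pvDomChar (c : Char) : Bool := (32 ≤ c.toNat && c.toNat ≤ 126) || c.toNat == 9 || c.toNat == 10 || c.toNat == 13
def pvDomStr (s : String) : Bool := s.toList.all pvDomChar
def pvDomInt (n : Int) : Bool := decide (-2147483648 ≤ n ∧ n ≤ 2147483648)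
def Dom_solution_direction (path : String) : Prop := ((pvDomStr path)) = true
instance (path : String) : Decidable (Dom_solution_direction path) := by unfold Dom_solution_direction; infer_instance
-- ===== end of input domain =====

-- B replaces A's exhaustive (orientation, token) branch table by modular arithmetic on an
-- orientation cycle (south,east,north,west; left = +1 mod 4); objective: simpler.


-- ===== PORT A =====
-- 'directions += s' is string concatenation; carried as List Char (exact), turned into a String at the end.
def solaStep (dirs : List Char) (o : String) (tok : String) : List Char × String :=
  if tok = "right" then
    if o = "south" then (dirs ++ "turn left move forward ".toList, "east")
    else if o = "north" then (dirs ++ "turn right move forward ".toList, "east")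
    else if o = "east" then (dirs ++ "move forward ".toList, o)
    else if o = "west" then (dirs ++ "turn right turn right move forward ".toList, "east")
    else (dirs, o)
  else if tok = "left" then
    if o = "south" then (dirs ++ "turn right move forward ".toList, "west")
    else if o = "north" then (dirs ++ "turn left move forward ".toList, "west")
    else if o = "east" then (dirs ++ "turn left turn left move forward ".toList, "west")
    else if o = "west" then (dirs ++ "move forward ".toList, o)
    else (dirs, o)
  else if tok = "down" then
    if o = "south" then (dirs ++ "move forward ".toList, "south")
    else if o = "north" then (dirs ++ "turn left turn left move forward ".toList, "south")
    else if o = "east" then (dirs ++ "turn right move forward ".toList, "south")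
    else if o = "west" then (dirs ++ "turn left move forward ".toList, "south")
    else (dirs, o)
  else if tok = "up" then
    if o = "south" then (dirs ++ "turn right turn right move forward ".toList, "north")
    else if o = "north" then (dirs ++ "move forward ".toList, "north")
    else if o = "east" then (dirs ++ "turn left move forward ".toList, "north")
    else if o = "west" then (dirs ++ "turn right move forward ".toList, "north")
    else (dirs, o)
  else (dirs, o)

def solaLoop : List String → List Char → String → List Char
  | [], dirs, _ => dirs
  | tok :: ts, dirs, o =>
    let p := solaStep dirs o tok
    solaLoop ts p.1 p.2

def solution_direction (path : String) : String :=
  if path = "Goal not reachable" then path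
  else String.ofList (solaLoop ((PySem.Str.split? path " ").getD []) [] "south")

-- ===== PORT B =====
def solbTarget? (tok : String) : Option Int :=
  if tok = "down" then some 0
  else if tok = "right" then some 1
  else if tok = "up" then some 2
  else if tok = "left" then some 3
  else none

def solbLoop : List String → Int → List String
  | [], _ => []
  | tok :: ts, cur =>
    match solbTarget? tok with
    | none => solbLoop ts cur
    | some t =>
      let d := PySem.Int.mod (t - cur) 4
      (if d = 1 then ["turn left "]
       else if d = 3 then ["turn right "]
       else if d = 2 then
         [if t = 1 ∨ t = 2 then "turn right turn right " else "turn left turn left "]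
       else []) ++ ["move forward "] ++ solbLoop ts t

def solution_direction_alt (path : String) : String :=
  if path = "Goal not reachable" then path
  else PySem.Str.join "" (solbLoop ((PySem.Str.split? path " ").getD []) 0)

-- ===== PRECONDITION & SPEC =====
def Spec_solution_direction (path : String) (out : String) : Prop := out = solution_direction_alt path
instance (path : String) (out : String) : Decidable (Spec_solution_direction path out) := by unfold Spec_solution_direction; infer_instance

-- ===== CLAIM (what is proved, stated in full; the proofs are below) =====
def Claim_equal_solution_direction : Prop := ∀ (path : String), Dom_solution_direction path → Spec_solution_direction path (solution_direction path)

-- ===== LEMMAS AND PROOFS =====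
theorem flatten_intersperse_nil (l : List (List Char)) :
    (List.intersperse ([] : List Char) l).flatten = l.flatten := by
  induction l with
  | nil => rfl
  | cons a l ih =>
    cases l with
    | nil => rfl
    | cons b t => simpa [List.intersperse] using ih

def solOrient (cur : Int) : String :=
  if cur = 0 then "south" else if cur = 1 then "east" else if cur = 2 then "north" else "west"

theorem sol_loop_eq (ts : List String) :
    ∀ (dirs : List Char) (cur : Int), (cur = 0 ∨ cur = 1 ∨ cur = 2 ∨ cur = 3) →
    solaLoop ts dirs (solOrient cur) =
      dirs ++ ((solbLoop ts cur).map String.toList).flatten := by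
  induction ts with
  | nil => intro dirs cur _; simp [solaLoop, solbLoop]
  | cons tok ts ih =>
    intro dirs cur hcur
    rcases hcur with rfl | rfl | rfl | rfl <;>
      by_cases h1 : tok = "right" <;>
      by_cases h2 : tok = "left" <;>
      by_cases h3 : tok = "down" <;>
      by_cases h4 : tok = "up" <;>
      simp_all [solaLoop, solaStep, solbLoop, solbTarget?, solOrient, PySem.Int.mod]

-- ===== VERDICT (by name: the statement is the Claim_ definition above) =====
theorem solution_direction_spec : Claim_equal_solution_direction := by
  intro path _
  unfold Spec_solution_direction solution_direction solution_direction_alt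
  by_cases hp : path = "Goal not reachable"
  · simp [hp]
  · have h := sol_loop_eq ((PySem.Str.split? path " ").getD []) [] 0 (by norm_num)
    simp only [hp, if_false, PySem.Str.join]
    rw [show solOrient 0 = "south" from rfl] at h
    rw [h]
    simp [PySem.Chars.join, List.intercalate, flatten_intersperse_nil]
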